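-- pv_equiv track=rewrite | github.com/clefever/aoc2024 | day09.py | get_span_of_size
-- ===== SOURCE A (Python) =====
-- def get_span_of_size(filesystem: list[int], size: int, max_index: int) -> int:
--     sum = 0
--     index = -1
--     for i in range(max_index):
--         if filesystem[i] == -1:
--             if index == -1:
--                 index = i
--             sum += 1
--             if sum >= size:
--                 break
--         else:
--             sum = 0
--             index = -1
--     if sum >= size:
--         return index
--     else:
--         return -1
-- ===== SOURCE B (Python) =====
-- def get_span_of_size(filesystem: list[int], size: int, max_index: int) -> int:
--     # Build the full table of contiguous free spans, then search it.
--     spans = []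
--     start = None
--     for i in range(max_index):
--         if filesystem[i] == -1:
--             if start is None:
--                 start = i
--         else:
--             if start is not None:
--                 spans.append((start, i - start))
--                 start = None
--     if start is not None:
--         spans.append((start, max_index - start))
--     for s, l in spans:
--         if l >= size:
--             return s
--     return -1
-- ===== Notes on version B (the rewrite author's own statement) =====
-- stated objective: alternative
-- what changed: B replaces A's single guarded scan with break/run-counters by a two-phase decomposition: first build the complete table of contiguous free spans as (start, length) pairs, then search that table for the first span of sufficient length.
-- outside the precondition, e.g. on get_span_of_size([-1, -1], 1, 5): A returns 0, B raises IndexError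
import Mathlib
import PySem

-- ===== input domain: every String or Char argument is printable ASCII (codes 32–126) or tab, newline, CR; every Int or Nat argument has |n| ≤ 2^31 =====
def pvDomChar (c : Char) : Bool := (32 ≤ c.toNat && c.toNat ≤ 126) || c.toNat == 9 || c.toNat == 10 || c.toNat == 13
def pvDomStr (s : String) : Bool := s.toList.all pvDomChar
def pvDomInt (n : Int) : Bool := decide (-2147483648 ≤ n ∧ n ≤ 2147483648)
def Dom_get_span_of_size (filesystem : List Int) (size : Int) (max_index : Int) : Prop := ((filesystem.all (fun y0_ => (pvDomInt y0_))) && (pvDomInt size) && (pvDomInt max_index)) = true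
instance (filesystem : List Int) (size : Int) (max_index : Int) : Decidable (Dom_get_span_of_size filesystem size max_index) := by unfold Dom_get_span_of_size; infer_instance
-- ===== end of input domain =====

-- B builds the full table of contiguous free spans, then searches it; A is a single
-- guarded scan with run counters and an early break. Return-value equivalence.

-- ===== PORT A =====
-- A's for-loop with break, as structural recursion over the index list of range(max_index);
-- state is (sum, index); an early `break` returns the state immediately.
def aLoop (fs : List Int) (size : Int) : List Int → Int → Int → Int × Int
  | [], sum, index => (sum, index)
  | i :: rest, sum, index =>
    if (PySem.List.pyGet? fs i).getD 0 = -1 then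
      let index' := if index = -1 then i else index
      let sum' := sum + 1
      if size ≤ sum' then (sum', index')   -- break
      else aLoop fs size rest sum' index'
    else aLoop fs size rest 0 (-1)

def get_span_of_size (filesystem : List Int) (size : Int) (max_index : Int) : Int :=
  let r := aLoop filesystem size (PySem.List.pyRange 0 max_index 1) 0 (-1)
  if size ≤ r.1 then r.2 else -1

-- ===== PORT B =====
-- phase 1: build the list of all (start, length) free spans over range(max_index)
def bBuild (fs : List Int) : List Int → Option Int → List (Int × Int) → Option Int × List (Int × Int)
  | [], start, spans => (start, spans)
  | i :: rest, start, spans =>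
    if (PySem.List.pyGet? fs i).getD 0 = -1 then
      bBuild fs rest (match start with | none => some i | some s => some s) spans
    else
      match start with
      | none => bBuild fs rest none spans
      | some s => bBuild fs rest none (spans ++ [(s, i - s)])

-- close the trailing open span, if any
def bFinalize (m : Int) : Option Int × List (Int × Int) → List (Int × Int)
  | (none, spans) => spans
  | (some s, spans) => spans ++ [(s, m - s)]

-- phase 2: first span of length ≥ size
def bSearch (size : Int) : List (Int × Int) → Int
  | [] => -1
  | (s, l) :: rest => if size ≤ l then s else bSearch size rest

def get_span_of_size_alt (filesystem : List Int) (size : Int) (max_index : Int) : Int :=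
  bSearch size (bFinalize max_index (bBuild filesystem (PySem.List.pyRange 0 max_index 1) none []))

-- ===== PRECONDITION & SPEC =====
-- Pre_ excludes max_index > len(filesystem): there Python A raises IndexError unless an early
-- break on a long-enough free run happens to fire first (an artefact of the break), and B,
-- which always scans the whole range to build its span table, raises IndexError.
def Pre_get_span_of_size (filesystem : List Int) (size : Int) (max_index : Int) : Prop :=
  max_index ≤ filesystem.length

instance (filesystem : List Int) (size : Int) (max_index : Int) : Decidable (Pre_get_span_of_size filesystem size max_index) := by unfold Pre_get_span_of_size; infer_instance

def pvWitness_get_span_of_size : List Int × Int × Int := ([0, -1, -1, 5, -1], 2, 5)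

def Spec_get_span_of_size (filesystem : List Int) (size : Int) (max_index : Int) (out : Int) : Prop := out = get_span_of_size_alt filesystem size max_index
instance (filesystem : List Int) (size : Int) (max_index : Int) (out : Int) : Decidable (Spec_get_span_of_size filesystem size max_index out) := by unfold Spec_get_span_of_size; infer_instance

-- ===== CLAIM (what is proved, stated in full; the proofs are below) =====
def Claim_equal_get_span_of_size : Prop := ∀ (filesystem : List Int) (size : Int) (max_index : Int), Dom_get_span_of_size filesystem size max_index → Pre_get_span_of_size filesystem size max_index → Spec_get_span_of_size filesystem size max_index (get_span_of_size filesystem size max_index)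

-- ===== LEMMAS AND PROOFS =====

-- bSearch skips any prefix of short spans
lemma bSearch_append_short (size : Int) (spans rest : List (Int × Int))
    (h : ∀ p ∈ spans, p.2 < size) :
    bSearch size (spans ++ rest) = bSearch size rest := by
  induction spans with
  | nil => simp
  | cons p ps ih =>
    obtain ⟨s, l⟩ := p
    have hl := h (s, l) (List.mem_cons_self ..)
    simp only [List.cons_append, bSearch, if_neg (by omega : ¬ size ≤ l)]
    exact ih (fun q hq => h q (List.mem_cons_of_mem _ hq))

-- a list of only short spans yields no hit
lemma bSearch_all_short (size : Int) (spans : List (Int × Int))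
    (h : ∀ p ∈ spans, p.2 < size) : bSearch size spans = -1 := by
  have := bSearch_append_short size spans [] h
  simpa [bSearch] using this

-- bBuild only appends to its accumulator
lemma bBuild_acc (fs : List Int) (is : List Int) :
    ∀ (start : Option Int) (spans : List (Int × Int)),
    bBuild fs is start spans
      = ((bBuild fs is start []).1, spans ++ (bBuild fs is start []).2) := by
  induction is with
  | nil => intro start spans; simp [bBuild]
  | cons i rest ih =>
    intro start spans
    simp only [bBuild]
    split
    · exact ih _ spans
    · match start with
      | none => exact ih none spans
      | some s =>
        simp only
        rw [ih none (spans ++ [(s, i - s)]), ih none ([] ++ [(s, i - s)])]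
        simp

lemma bFinalize_append (m : Int) (st : Option Int) (x t : List (Int × Int)) :
    bFinalize m (st, x ++ t) = x ++ bFinalize m (st, t) := by
  cases st <;> simp [bFinalize]

-- step lemmas reducing one iteration of each loop
lemma aLoop_cons_free (fs : List Int) (size i : Int) (rest : List Int) (sum index : Int)
    (hv : (PySem.List.pyGet? fs i).getD 0 = -1) :
    aLoop fs size (i :: rest) sum index =
      if size ≤ sum + 1 then (sum + 1, if index = -1 then i else index)
      else aLoop fs size rest (sum + 1) (if index = -1 then i else index) := by
  simp [aLoop, hv]

lemma aLoop_cons_used (fs : List Int) (size i : Int) (rest : List Int) (sum index : Int)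
    (hv : ¬ (PySem.List.pyGet? fs i).getD 0 = -1) :
    aLoop fs size (i :: rest) sum index = aLoop fs size rest 0 (-1) := by
  simp [aLoop, hv]

lemma bBuild_cons_free_none (fs : List Int) (i : Int) (rest : List Int) (spans : List (Int × Int))
    (hv : (PySem.List.pyGet? fs i).getD 0 = -1) :
    bBuild fs (i :: rest) none spans = bBuild fs rest (some i) spans := by
  simp [bBuild, hv]

lemma bBuild_cons_free_some (fs : List Int) (i : Int) (rest : List Int) (s : Int)
    (spans : List (Int × Int)) (hv : (PySem.List.pyGet? fs i).getD 0 = -1) :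
    bBuild fs (i :: rest) (some s) spans = bBuild fs rest (some s) spans := by
  simp [bBuild, hv]

lemma bBuild_cons_used_none (fs : List Int) (i : Int) (rest : List Int) (spans : List (Int × Int))
    (hv : ¬ (PySem.List.pyGet? fs i).getD 0 = -1) :
    bBuild fs (i :: rest) none spans = bBuild fs rest none spans := by
  simp [bBuild, hv]

lemma bBuild_cons_used_some (fs : List Int) (i : Int) (rest : List Int) (s : Int)
    (spans : List (Int × Int)) (hv : ¬ (PySem.List.pyGet? fs i).getD 0 = -1) :
    bBuild fs (i :: rest) (some s) spans = bBuild fs rest none (spans ++ [(s, i - s)]) := by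
  simp [bBuild, hv]

-- once the open run already has ≥ size free cells, B will report its start
lemma bHit (fs : List Int) (size : Int) :
    ∀ (n : ℕ) (k m s : Int) (spans : List (Int × Int)),
    (m - k).toNat ≤ n → k ≤ m → size ≤ k - s →
    (∀ p ∈ spans, p.2 < size) →
    bSearch size (bFinalize m (bBuild fs (PySem.List.pyRange k m 1) (some s) spans)) = s := by
  intro n
  induction n with
  | zero =>
    intro k m s spans hn hkm hsz hshort
    rw [PySem.List.pyRange_one_eq_nil (by omega)]
    simp only [bBuild, bFinalize]
    rw [bSearch_append_short size spans _ hshort]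
    simp only [bSearch]
    rw [if_pos (by omega)]
  | succ n ih =>
    intro k m s spans hn hkm hsz hshort
    by_cases hlt : k < m
    · rw [PySem.List.pyRange_one_cons hlt]
      by_cases hv : (PySem.List.pyGet? fs k).getD 0 = -1
      · rw [bBuild_cons_free_some fs k _ s spans hv]
        exact ih (k+1) m s spans (by omega) (by omega) (by omega) hshort
      · rw [bBuild_cons_used_some fs k _ s spans hv]
        rw [bBuild_acc, bFinalize_append, List.append_assoc,
            bSearch_append_short size spans _ hshort]
        simp only [List.singleton_append, bSearch]
        rw [if_pos (by omega)]
    · have hkm' : m = k := by omega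
      subst hkm'
      rw [PySem.List.pyRange_one_eq_nil le_rfl]
      simp only [bBuild, bFinalize]
      rw [bSearch_append_short size spans _ hshort]
      simp only [bSearch]
      rw [if_pos (by omega)]

-- main invariant relating A's (sum, index) state to B's (start, spans) state, for size ≥ 1
lemma main_inv (fs : List Int) (size : Int) (hsz : 1 ≤ size) :
    ∀ (n : ℕ) (k m sum index : Int) (start : Option Int) (spans : List (Int × Int)),
    (m - k).toNat ≤ n → 0 ≤ k →
    (match start with
     | none => sum = 0 ∧ index = -1
     | some s => sum = k - s ∧ index = s ∧ 0 ≤ s ∧ s < k) →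
    sum < size → (∀ p ∈ spans, p.2 < size) →
    (if size ≤ (aLoop fs size (PySem.List.pyRange k m 1) sum index).1
     then (aLoop fs size (PySem.List.pyRange k m 1) sum index).2 else -1)
      = bSearch size (bFinalize m (bBuild fs (PySem.List.pyRange k m 1) start spans)) := by
  intro n
  induction n with
  | zero =>
    intro k m sum index start spans hn hk hinv hlt hshort
    rw [PySem.List.pyRange_one_eq_nil (by omega)]
    simp only [aLoop, bBuild]
    rw [if_neg (show ¬ size ≤ (sum, index).1 by simp; omega)]
    cases start with
    | none =>
      simp only [bFinalize]
      exact (bSearch_all_short size spans hshort).symm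
    | some s =>
      obtain ⟨h1, h2, h3, h4⟩ := hinv
      simp only [bFinalize]
      rw [bSearch_append_short size spans _ hshort]
      simp only [bSearch]
      rw [if_neg (by omega)]
  | succ n ih =>
    intro k m sum index start spans hn hk hinv hlt hshort
    by_cases hkm : k < m
    · rw [PySem.List.pyRange_one_cons hkm]
      by_cases hv : (PySem.List.pyGet? fs k).getD 0 = -1
      · rw [aLoop_cons_free fs size k _ sum index hv]
        by_cases hbrk : size ≤ sum + 1
        · simp only [if_pos hbrk]
          cases start with
          | none =>
            obtain ⟨h1, h2⟩ := hinv
            rw [bBuild_cons_free_none fs k _ spans hv]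
            simp only [if_pos h2]
            rw [bHit fs size n (k+1) m k spans (by omega) (by omega) (by omega) hshort]
          | some s =>
            obtain ⟨h1, h2, h3, h4⟩ := hinv
            rw [bBuild_cons_free_some fs k _ s spans hv]
            rw [if_neg (show ¬ index = -1 by omega)]
            rw [bHit fs size n (k+1) m s spans (by omega) (by omega) (by omega) hshort]
            omega
        · simp only [if_neg hbrk]
          cases start with
          | none =>
            obtain ⟨h1, h2⟩ := hinv
            rw [bBuild_cons_free_none fs k _ spans hv]
            simp only [if_pos h2]
            exact ih (k+1) m (sum+1) k (some k) spans (by omega) (by omega)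
              (by constructor <;> omega) (by omega) hshort
          | some s =>
            obtain ⟨h1, h2, h3, h4⟩ := hinv
            rw [bBuild_cons_free_some fs k _ s spans hv]
            rw [if_neg (show ¬ index = -1 by omega)]
            have := ih (k+1) m (sum+1) index (some s) spans (by omega) (by omega)
              (by refine ⟨by omega, by omega, by omega, by omega⟩) (by omega) hshort
            exact this
      · rw [aLoop_cons_used fs size k _ sum index hv]
        cases start with
        | none =>
          rw [bBuild_cons_used_none fs k _ spans hv]
          exact ih (k+1) m 0 (-1) none spans (by omega) (by omega) ⟨rfl, rfl⟩ (by omega) hshort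
        | some s =>
          obtain ⟨h1, h2, h3, h4⟩ := hinv
          rw [bBuild_cons_used_some fs k _ s spans hv]
          refine ih (k+1) m 0 (-1) none (spans ++ [(s, k - s)]) (by omega) (by omega)
            ⟨rfl, rfl⟩ (by omega) ?_
          intro p hp
          rcases List.mem_append.mp hp with h | h
          · exact hshort p h
          · simp at h
            subst h
            simp
            omega
    · rw [PySem.List.pyRange_one_eq_nil (by omega)]
      simp only [aLoop, bBuild]
      rw [if_neg (show ¬ size ≤ (sum, index).1 by simp; omega)]
      cases start with
      | none =>
        simp only [bFinalize]
        exact (bSearch_all_short size spans hshort).symm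
      | some s =>
        obtain ⟨h1, h2, h3, h4⟩ := hinv
        simp only [bFinalize]
        rw [bSearch_append_short size spans _ hshort]
        simp only [bSearch]
        rw [if_neg (by omega)]

-- the size ≤ 0 case: both return the first free index (or -1 if none)
lemma main_nonpos (fs : List Int) (size : Int) (hsz : size ≤ 0) :
    ∀ (n : ℕ) (k m : Int), (m - k).toNat ≤ n → 0 ≤ k →
    (if size ≤ (aLoop fs size (PySem.List.pyRange k m 1) 0 (-1)).1
     then (aLoop fs size (PySem.List.pyRange k m 1) 0 (-1)).2 else -1)
      = bSearch size (bFinalize m (bBuild fs (PySem.List.pyRange k m 1) none [])) := by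
  intro n
  induction n with
  | zero =>
    intro k m hn hk
    rw [PySem.List.pyRange_one_eq_nil (by omega)]
    simp [aLoop, bBuild, bFinalize, bSearch, hsz]
  | succ n ih =>
    intro k m hn hk
    by_cases hkm : k < m
    · rw [PySem.List.pyRange_one_cons hkm]
      by_cases hv : (PySem.List.pyGet? fs k).getD 0 = -1
      · rw [aLoop_cons_free fs size k _ 0 (-1) hv, bBuild_cons_free_none fs k _ [] hv]
        simp only [if_pos (show size ≤ (0:Int) + 1 by omega)]
        rw [bHit fs size n (k+1) m k [] (by omega) (by omega) (by omega) (by simp)]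
        simp
      · rw [aLoop_cons_used fs size k _ 0 (-1) hv, bBuild_cons_used_none fs k _ [] hv]
        exact ih (k+1) m (by omega) (by omega)
    · rw [PySem.List.pyRange_one_eq_nil (by omega)]
      simp [aLoop, bBuild, bFinalize, bSearch, hsz]

-- ===== VERDICT (by name: the statement is the Claim_ definition above) =====
theorem get_span_of_size_spec : Claim_equal_get_span_of_size := by
  intro fs size mi _ _
  unfold Spec_get_span_of_size get_span_of_size get_span_of_size_alt
  by_cases hsz : 1 ≤ size
  · exact main_inv fs size hsz (mi - 0).toNat 0 mi 0 (-1) none [] (by omega) (by omega)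
      ⟨rfl, rfl⟩ (by omega) (by simp)
  · exact main_nonpos fs size (by omega) (mi - 0).toNat 0 mi (by omega) (by omega)
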